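-- pv_equiv track=rewrite | github.com/FixTeen-36/Nonograms_Katana_Solver | src/solver.py | get_all_row_options
-- ===== SOURCE A (Python) =====
-- def get_all_row_options(row_len: int, elements: list) -> list:  # el: elments_ length
--     remainder = row_len - (sum(elements) + len(elements) - 1)  # remainder: how many blank spaces are after the last element
--     cc = remainder
--     coordinates = []
--     for length in elements:
--         to_extend = range(cc, (cc + length))
--         coordinates.extend(list(to_extend))
--         cc += length + 1
--
--     options = [coordinates]
--     number_of_copies = [0] * remainder
--     s_n = 1  # sum of number of copies
--     for i in range(len(elements)):
--         for _ in range(remainder):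
--             for coordinates in options[-s_n:]:
--                 c_copy = coordinates[:]
--                 j_a = sum(elements[:i])
--                 c_copy.insert(j_a, (c_copy[j_a] - 1))
--                 j_b = sum(elements[:(i + 1)])
--                 c_copy.pop(j_b)
--                 options.append(c_copy)
--             number_of_copies.append(s_n)
--             s_n -= number_of_copies.pop(0)
--         s_n = sum(number_of_copies)
--
--     return options
-- ===== SOURCE B (Python) =====
-- def _coords(gaps, elements):
--     # gaps = (a0, ..., am): extra blank cells in each of the m+1 gaps
--     coords = []
--     cur = 0
--     for a, length in zip(gaps, elements):
--         cur += a
--         coords.extend(range(cur, cur + length))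
--         cur += length + 1
--     return coords
--
-- def get_all_row_options(row_len: int, elements: list) -> list:
--     m = len(elements)
--     remainder = row_len - (sum(elements) + m - 1)
--     # enumerate shift keys (a_m, ..., a_1) of nonnegative extra blanks, built level by
--     # level within the slack budget; a_0 takes whatever slack remains
--     suffixes = [[]]
--     for _ in range(m):
--         suffixes = [s + [a] for s in suffixes for a in range(remainder - sum(s) + 1)]
--     packed = _coords([remainder] + [0] * m, elements)  # fully right-packed placement
--     return [packed] + [_coords([remainder - sum(s)] + s[::-1], elements)
--                        for s in suffixes if any(s)]
-- ===== Notes on version B (the rewrite author's own statement) =====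
-- stated objective: simpler
-- what changed: A materialises each placement by repeatedly copy-shifting earlier placements, steered by a sliding queue of copy counts; B instead builds the right-packed placement directly and then enumerates the stars-and-bars gap vectors of its proper left-shifts recursively, constructing each placement's coordinates straight from its gap vector. Pre_ excludes rows with positive slack whose block list contains a non-positive length: outside the natural nonogram domain, where A raises IndexError or returns accidental shift debris.
-- outside the precondition, e.g. on get_all_row_options(2, [-2, 2]): A returns [[0, 1], [-1, 1], [-1, 1]], B returns [[0, 1], [0, 1], [-1, 0]]; on get_all_row_options(1, [0]): A raises IndexError, B returns [[], []]
import Mathlib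
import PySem

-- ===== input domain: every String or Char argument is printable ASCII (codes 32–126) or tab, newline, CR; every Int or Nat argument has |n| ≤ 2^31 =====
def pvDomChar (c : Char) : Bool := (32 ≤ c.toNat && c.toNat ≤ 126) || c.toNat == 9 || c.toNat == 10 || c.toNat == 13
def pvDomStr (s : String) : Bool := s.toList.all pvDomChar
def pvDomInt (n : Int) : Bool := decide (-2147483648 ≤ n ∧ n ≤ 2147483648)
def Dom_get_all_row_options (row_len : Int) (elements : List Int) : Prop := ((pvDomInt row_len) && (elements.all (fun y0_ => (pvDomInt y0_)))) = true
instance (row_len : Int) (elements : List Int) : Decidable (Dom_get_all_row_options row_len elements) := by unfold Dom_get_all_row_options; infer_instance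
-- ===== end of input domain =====

-- B builds the right-packed placement and the gap-vectors of its proper left-shifts directly
-- instead of A's copy-shift queue machinery; equal on Pre_, proved below.

-- ===== PORT A =====
-- A: first loop body — coordinates.extend(range(cc, cc+length)); cc += length+1
def aInit (st : List Int × Int) (length : Int) : List Int × Int :=
  (st.1 ++ PySem.List.pyRange st.2 (st.2 + length) 1, st.2 + length + 1)

-- A: the body applied to each `coordinates` of options[-s_n:]:
-- c_copy = coordinates[:]; c_copy.insert(j_a, c_copy[j_a]-1); c_copy.pop(j_b)
def aShift (elements : List Int) (i : Nat) (coordinates : List Int) : List Int :=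
  let j_a : Int := (PySem.List.slice elements none (some (i : Int))).sum
  -- c_copy[j_a]: none = IndexError, unreachable under Pre_ (the default 0 is never used there)
  let c1 := PySem.List.insert coordinates j_a (PySem.List.pyGetD coordinates j_a 0 - 1)
  let j_b : Int := (PySem.List.slice elements none (some ((i : Int) + 1))).sum
  match PySem.List.pop? c1 j_b with
  | some p => p.2
  | none => c1  -- IndexError, unreachable under Pre_

-- A: one iteration of `for _ in range(remainder)`
def aRound (elements : List Int) (i : Nat) (st : List (List Int) × List Int × Int) :
    List (List Int) × List Int × Int :=
  let options := st.1 ++ (PySem.List.slice st.1 (some (-st.2.2)) none).map (aShift elements i)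
  let noc := st.2.1 ++ [st.2.2]
  match PySem.List.pop? noc 0 with
  | some p => (options, p.2, st.2.2 - p.1)
  | none => (options, noc, st.2.2)  -- noc.pop(0) on the just-extended queue: never empty

-- A: one iteration of `for i in range(len(elements))`, ending with s_n = sum(number_of_copies)
def aPhase (elements : List Int) (remainder : Int)
    (st : List (List Int) × List Int × Int) (i : Nat) : List (List Int) × List Int × Int :=
  let st1 := (List.range remainder.toNat).foldl (fun s _ => aRound elements i s) st
  (st1.1, st1.2.1, st1.2.1.sum)

def get_all_row_options (row_len : Int) (elements : List Int) : List (List Int) :=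
  let remainder := row_len - (elements.sum + (elements.length : Int) - 1)
  let coordinates := (elements.foldl aInit ([], remainder)).1
  let st := (List.range elements.length).foldl (aPhase elements remainder)
      ([coordinates], PySem.List.pyRepeat [(0 : Int)] remainder, 1)
  st.1

-- ===== PORT B =====
-- B: coordinates of the placement whose extra blanks per gap are `gaps`
def bCoords (cur : Int) (gaps : List Int) (elements : List Int) : List Int :=
  match gaps, elements with
  | a :: gs, e :: es => PySem.List.pyRange (cur + a) (cur + a + e) 1 ++ bCoords (cur + a + e + 1) gs es
  | _, _ => []

-- B: one level of the shift-key construction — suffixes = [s + [a] for s in suffixes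
-- for a in range(remainder - sum(s) + 1)]
def bSufStep (r : Int) (sufs : List (List Int)) : List (List Int) :=
  sufs.flatMap (fun s => (PySem.List.pyRange 0 (r - s.sum + 1) 1).map (fun a => s ++ [a]))

-- s[::-1] is ported as List.reverse and any(s) as List.any (· != 0) (exact: Python int
-- truthiness); the comprehension with its `if` filter is ported as filter-then-map.
def get_all_row_options_alt (row_len : Int) (elements : List Int) : List (List Int) :=
  let m := elements.length
  let remainder := row_len - (elements.sum + (m : Int) - 1)
  let sufs := (List.range m).foldl (fun ss _ => bSufStep remainder ss) [[]]
  let packed := bCoords 0 (remainder :: List.replicate m 0) elements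
  packed :: (sufs.filter (fun s => s.any (fun a => a != 0))).map
      (fun s => bCoords 0 ((remainder - s.sum) :: s.reverse) elements)

-- ===== PRECONDITION & SPEC =====
-- Pre_ excludes rows with slack (remainder ≥ 1) whose block list contains a non-positive length:
-- outside the natural domain, and there A either raises IndexError or returns accidental shift debris.
def Pre_get_all_row_options (row_len : Int) (elements : List Int) : Prop :=
  row_len - (elements.sum + (elements.length : Int) - 1) ≤ 0 ∨ ∀ e ∈ elements, 1 ≤ e
instance (row_len : Int) (elements : List Int) : Decidable (Pre_get_all_row_options row_len elements) := by
  unfold Pre_get_all_row_options; infer_instance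

def pvWitness_get_all_row_options : Int × List Int := (5, [2, 1])

def Spec_get_all_row_options (row_len : Int) (elements : List Int) (out : List (List Int)) : Prop :=
  out = get_all_row_options_alt row_len elements
instance (row_len : Int) (elements : List Int) (out : List (List Int)) :
    Decidable (Spec_get_all_row_options row_len elements out) := by
  unfold Spec_get_all_row_options; infer_instance

-- ===== CLAIM (what is proved, stated in full; the proofs are below) =====
def Claim_equal_get_all_row_options : Prop := ∀ (row_len : Int) (elements : List Int), Dom_get_all_row_options row_len elements → Pre_get_all_row_options row_len elements → Spec_get_all_row_options row_len elements (get_all_row_options row_len elements)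

-- ===== LEMMAS AND PROOFS =====

-- all gap vectors (a0,...,ak) of nonnegative ints summing to r, a_k varying slowest
def bVecs (k : Nat) (r : Int) : List (List Int) :=
  match k with
  | 0 => [[r]]
  | k + 1 => (PySem.List.pyRange 0 (r + 1) 1).flatMap
      (fun ak => (bVecs k (r - ak)).map (fun v => v ++ [ak]))

-- gap vectors (a0,...,ak) with a1..ak not all zero: the proper left-shifts
def bShifted (k : Nat) (r : Int) : List (List Int) :=
  match k with
  | 0 => []
  | k + 1 => (bShifted k r).map (fun v => v ++ [0])
      ++ (PySem.List.pyRange 1 (r + 1) 1).flatMap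
          (fun a => (bVecs k (r - a)).map (fun v => v ++ [a]))

-- the level construction, unrolled
def sufsSpec (j : Nat) (r : Int) : List (List Int) :=
  match j with
  | 0 => [[]]
  | j + 1 => bSufStep r (sufsSpec j r)

theorem fold_sufs (r : Int) (m : Nat) :
    (List.range m).foldl (fun ss _ => bSufStep r ss) [[]] = sufsSpec m r := by
  induction m with
  | zero => rfl
  | succ m ih =>
    rw [List.range_succ, List.foldl_append, ih]
    rfl

theorem sufsSpec_cons (j : Nat) (r : Int) :
    sufsSpec (j + 1) r
      = (PySem.List.pyRange 0 (r + 1) 1).flatMap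
          (fun a => (sufsSpec j (r - a)).map (fun s => a :: s)) := by
  induction j generalizing r with
  | zero =>
    show bSufStep r [[]] = _
    simp only [bSufStep, sufsSpec, List.flatMap_cons, List.flatMap_nil, List.append_nil,
      List.nil_append, List.sum_nil, List.map_cons, List.map_nil]
    rw [show r - 0 + 1 = r + 1 by ring, ← List.map_eq_flatMap]
  | succ j ih =>
    show bSufStep r (sufsSpec (j + 1) r) = _
    rw [ih, bSufStep, List.flatMap_assoc]
    apply List.flatMap_congr
    intro a _
    rw [List.flatMap_map,
        show sufsSpec (j + 1) (r - a) = bSufStep (r - a) (sufsSpec j (r - a)) from rfl,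
        bSufStep, List.map_flatMap]
    apply List.flatMap_congr
    intro s _
    rw [List.map_map, show r - (a :: s).sum + 1 = (r - a) - s.sum + 1 by
        simp [List.sum_cons]; ring]
    apply List.map_congr_left
    intro x _
    rfl

theorem sufs_to_vecs (m : Nat) (r : Int) :
    (sufsSpec m r).map (fun s => (r - s.sum) :: s.reverse) = bVecs m r := by
  induction m generalizing r with
  | zero => simp [sufsSpec, bVecs]
  | succ m ih =>
    rw [sufsSpec_cons, List.map_flatMap]
    show _ = (PySem.List.pyRange 0 (r + 1) 1).flatMap
        (fun a => (bVecs m (r - a)).map (fun v => v ++ [a]))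
    apply List.flatMap_congr
    intro a _
    rw [List.map_map, ← ih (r - a), List.map_map]
    apply List.map_congr_left
    intro v _
    simp only [Function.comp_apply, List.sum_cons, List.reverse_cons, List.cons_append]
    rw [show r - (a + v.sum) = r - a - v.sum by ring]

theorem bVecs_zero_nonneg (r : Int) (_hr : 0 ≤ r) : bVecs 0 r = [[r]] := rfl

theorem bVecs_succ_nonneg (k : Nat) (r : Int) (_hr : 0 ≤ r) :
    bVecs (k + 1) r = (PySem.List.pyRange 0 (r + 1) 1).flatMap
      (fun ak => (bVecs k (r - ak)).map (fun v => v ++ [ak])) := rfl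

theorem bShifted_nonpos (k : Nat) (r : Int) (hr : r ≤ 0) : bShifted k r = [] := by
  induction k with
  | zero => rfl
  | succ k ih =>
    rw [bShifted, ih, PySem.List.pyRange_one_eq_nil (by omega : r + 1 ≤ 1)]
    simp

theorem sufs_to_shifted (m : Nat) (r : Int) :
    ((sufsSpec m r).filter (fun s => s.any (fun a => a != 0))).map
        (fun s => (r - s.sum) :: s.reverse)
      = bShifted m r := by
  induction m generalizing r with
  | zero => rfl
  | succ m ih =>
    rcases lt_or_ge r 0 with hr | hr
    · rw [sufsSpec_cons, PySem.List.pyRange_one_eq_nil (by omega : r + 1 ≤ 0),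
          bShifted_nonpos (m + 1) r (by omega)]
      rfl
    · rw [sufsSpec_cons, PySem.List.pyRange_one_cons (by omega : (0 : Int) < r + 1),
          List.flatMap_cons, List.filter_append, List.map_append]
      show _ = (bShifted m r).map (fun v => v ++ [0])
          ++ (PySem.List.pyRange 1 (r + 1) 1).flatMap
              (fun a => (bVecs m (r - a)).map (fun v => v ++ [a]))
      congr 1
      · -- the a = 0 chunk carries the filter through unchanged
        rw [List.filter_map]
        have hp : ((fun s => s.any (fun a => a != 0)) ∘ (fun s => (0 : Int) :: s))
            = fun s : List Int => s.any (fun a => a != 0) := by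
          funext s
          simp
        rw [hp, List.map_map, show r - (0 : Int) = r by ring, ← ih r, List.map_map]
        apply List.map_congr_left
        intro v _
        simp only [Function.comp_apply, List.sum_cons, List.reverse_cons, List.cons_append]
        rw [show r - (0 + v.sum) = r - v.sum by ring]
      · -- every suffix in the a ≥ 1 chunk has a nonzero entry: the filter keeps all
        rw [List.filter_eq_self.mpr ?_, List.map_flatMap]
        · apply List.flatMap_congr
          intro a ha
          have ha1 : 1 ≤ a := ((PySem.List.mem_pyRange_one).mp ha).1
          rw [List.map_map, ← sufs_to_vecs m (r - a), List.map_map]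
          apply List.map_congr_left
          intro v _
          simp only [Function.comp_apply, List.sum_cons, List.reverse_cons, List.cons_append]
          rw [show r - (a + v.sum) = r - a - v.sum by ring]
        · intro s hs
          rw [List.mem_flatMap] at hs
          obtain ⟨a, ha, hs⟩ := hs
          rw [List.mem_map] at hs
          obtain ⟨w, _, rfl⟩ := hs
          have ha1 : 1 ≤ a := ((PySem.List.mem_pyRange_one).mp ha).1
          simp
          omega

theorem alt_eq (row_len : Int) (elements : List Int) :
    get_all_row_options_alt row_len elements
      = bCoords 0 ((row_len - (elements.sum + (elements.length : Int) - 1))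
            :: List.replicate elements.length 0) elements
        :: (bShifted elements.length
              (row_len - (elements.sum + (elements.length : Int) - 1))).map
            (fun v => bCoords 0 v elements) := by
  simp only [get_all_row_options_alt]
  rw [fold_sufs, ← sufs_to_shifted, List.map_map]
  rfl

theorem replicate_cons_append (k : Nat) (r : Int) :
    (r :: List.replicate k (0 : Int)) ++ [0] = r :: List.replicate (k + 1) 0 := by
  simp [List.replicate_succ']

theorem bVecs_eq_cons (k : Nat) (r : Int) (hr : 0 ≤ r) :
    bVecs k r = (r :: List.replicate k 0) :: bShifted k r := by
  induction k with
  | zero => simp [bVecs, bShifted]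
  | succ k ih =>
    rw [show bVecs (k + 1) r = (PySem.List.pyRange 0 (r + 1) 1).flatMap
          (fun a => (bVecs k (r - a)).map (fun v => v ++ [a])) from rfl,
        PySem.List.pyRange_one_cons (by omega : (0 : Int) < r + 1)]
    simp only [List.flatMap_cons, zero_add]
    rw [show r - 0 = r by ring, ih, List.map_cons, List.cons_append,
        replicate_cons_append, bShifted]

def incLast : List Int → List Int
  | [] => []
  | [a] => [a + 1]
  | a :: b :: rest => a :: incLast (b :: rest)

theorem bCoords_shift_head (cur a : Int) (gs els : List Int) :
    bCoords cur ((a + 1) :: gs) els = bCoords (cur + 1) (a :: gs) els := by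
  cases els with
  | nil => simp [bCoords]
  | cons e es => simp [bCoords]; ring_nf

theorem incLast_append_singleton (v : List Int) (x : Int) :
    incLast (v ++ [x]) = v ++ [x + 1] := by
  induction v with
  | nil => rfl
  | cons a t ih => cases t <;> simp_all [incLast]

theorem length_mem_bVecs (k : Nat) (r : Int) (v : List Int) (hv : v ∈ bVecs k r) :
    v.length = k + 1 := by
  induction k generalizing r v with
  | zero => simp [bVecs] at hv; simp [hv]
  | succ k ih =>
    simp [bVecs] at hv
    obtain ⟨ak, _, w, hw, rfl⟩ := hv
    simp [ih _ _ hw]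

theorem bCoords_length (cur : Int) (gaps els : List Int)
    (h : ∀ e ∈ els, 1 ≤ e) (hg : els.length ≤ gaps.length) :
    ((bCoords cur gaps els).length : Int) = els.sum := by
  induction els generalizing cur gaps with
  | nil => cases gaps <;> simp [bCoords]
  | cons e es ih =>
    cases gaps with
    | nil => simp at hg
    | cons g gs =>
      have he : (1:Int) ≤ e := h e (by simp)
      simp only [bCoords, List.length_append, PySem.List.length_pyRange_one]
      push_cast
      rw [ih _ _ (fun x hx => h x (by simp [hx])) (by simpa using hg)]
      simp
      omega
def headPart (k : Nat) (b : Int) : List (List Int) :=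
  match k with
  | 0 => []
  | k + 1 => (bVecs k b).map (fun v => v ++ [0])

theorem pyRange_one_shift (b : Int) :
    PySem.List.pyRange 1 (b + 1) 1 = (PySem.List.pyRange 0 b 1).map (· + 1) := by
  rw [PySem.List.pyRange_one, PySem.List.pyRange_one, List.map_map]
  have h : (b + 1 - 1) = b - 0 := by ring
  rw [h]
  apply List.map_congr_left
  intro x _
  simp; ring

theorem bVecs_decomp (k : Nat) (b : Int) (hb : 1 ≤ b) :
    bVecs k b = headPart k b ++ (bVecs k (b - 1)).map incLast := by
  induction k generalizing b with
  | zero =>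
    rw [bVecs_zero_nonneg b (by omega), bVecs_zero_nonneg (b - 1) (by omega)]
    simp [headPart, incLast]
  | succ k _ =>
    show bVecs (k+1) b = _
    rw [bVecs_succ_nonneg k b (by omega), headPart]
    rw [PySem.List.pyRange_one_cons (by omega)]
    simp only [List.flatMap_cons]
    congr 1
    · simp
    · rw [bVecs_succ_nonneg k (b - 1) (by omega)]
      have h1 : (b - 1 + 1) = b := by ring
      rw [h1]
      simp only [zero_add]
      rw [pyRange_one_shift, List.flatMap_map, List.map_flatMap]
      apply List.flatMap_congr
      intro ak _
      have h2 : b - (ak + 1) = b - 1 - ak := by ring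
      rw [h2, List.map_map]
      apply List.map_congr_left
      intro v _
      simp [incLast_append_singleton]

theorem bVecs_ne_nil (k : Nat) (b : Int) (hb : 0 ≤ b) : bVecs k b ≠ [] := by
  induction k generalizing b with
  | zero => rw [bVecs_zero_nonneg b hb]; simp
  | succ k ih =>
    rw [bVecs_succ_nonneg k b hb, PySem.List.pyRange_one_cons (by omega)]
    simp only [List.flatMap_cons, ne_eq, List.append_eq_nil_iff, not_and]
    intro h
    exact absurd h (by simpa using ih (b - 0) (by omega))

def Nlen (k : Nat) (b : Int) : Int := if b < 0 then 0 else ((bVecs k b).length : Int)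

theorem Nlen_zero (b : Int) (hb : 0 ≤ b) : Nlen 0 b = 1 := by
  rw [Nlen, if_neg (by omega), bVecs_zero_nonneg b hb]; simp

theorem Nlen_neg (k : Nat) (b : Int) (hb : b < 0) : Nlen k b = 0 := by
  rw [Nlen, if_pos hb]

theorem Nlen_pascal (k : Nat) (b : Int) (hb : 0 ≤ b) :
    Nlen (k + 1) b = Nlen k b + Nlen (k + 1) (b - 1) := by
  rcases eq_or_lt_of_le hb with h0 | h0
  · -- b = 0
    rw [Nlen, if_neg (by omega), Nlen, if_neg (by omega), Nlen, if_pos (by omega)]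
    rw [bVecs_succ_nonneg k b hb, PySem.List.pyRange_one_cons (by omega),
        PySem.List.pyRange_one_eq_nil (by omega)]
    simp [← h0]
  · rw [Nlen, if_neg (by omega), Nlen, if_neg (by omega), Nlen, if_neg (by omega)]
    rw [bVecs_decomp (k+1) b (by omega)]
    simp [headPart]

theorem Nlen_hockey (k : Nat) (B : Nat) :
    ((List.range B).map (fun u : Nat => Nlen k ((B : Int) - 1 - (u : Int)))).sum
      = Nlen (k + 1) ((B : Int) - 1) := by
  induction B with
  | zero =>
    simp only [List.range_zero, List.map_nil, List.sum_nil]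
    rw [show ((0:Nat):Int) - 1 = -1 by norm_num, Nlen_neg (k+1) (-1) (by omega)]
  | succ n ih =>
    rw [List.range_succ_eq_map, List.map_cons, List.sum_cons, List.map_map]
    have ht : (List.range n).map ((fun u : Nat => Nlen k ((n:Int) + 1 - 1 - (u:Int))) ∘ (· + 1))
        = (List.range n).map (fun u : Nat => Nlen k ((n:Int) - 1 - (u:Int))) := by
      apply List.map_congr_left
      intro x _
      simp only [Function.comp_apply]
      congr 1
      push_cast
      ring
    push_cast
    rw [ht, ih]
    have h0 : ((n:Int) + 1 - 1 - 0) = (n:Int) := by ring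
    rw [h0]
    have hp := Nlen_pascal k (n:Int) (by omega)
    have he : ((n:Int) + 1 - 1) = (n:Int) := by ring
    rw [he]
    omega
-- A's insert/pop body with the two index sums precomputed
def shiftOp (J K : Int) (c : List Int) : List Int :=
  let c1 := PySem.List.insert c J (PySem.List.pyGetD c J 0 - 1)
  match PySem.List.pop? c1 K with
  | some p => p.2
  | none => c1

theorem aShift_eq (els : List Int) (i : Nat) (c : List Int) :
    aShift els i c = shiftOp ((els.take i).sum) ((els.take (i+1)).sum) c := by
  simp only [aShift, shiftOp, PySem.List.slice_to_natCast]
  rw [show ((i:Int) + 1) = ((i+1 : Nat) : Int) by push_cast; ring, PySem.List.slice_to_natCast]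

theorem sum_nonneg_of_one_le (l : List Int) (h : ∀ e ∈ l, 1 ≤ e) : 0 ≤ l.sum := by
  induction l with
  | nil => simp
  | cons x t ih =>
    have := h x (by simp)
    have := ih (fun e he => h e (by simp [he]))
    simp; omega

theorem sum_take_nonneg (els : List Int) (h : ∀ e ∈ els, 1 ≤ e) (i : Nat) :
    0 ≤ (els.take i).sum :=
  sum_nonneg_of_one_le _ (fun e he => h e (List.mem_of_mem_take he))

theorem sum_take_le (els : List Int) (h : ∀ e ∈ els, 1 ≤ e) (i : Nat) :
    (els.take i).sum ≤ els.sum := by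
  have hd := sum_nonneg_of_one_le (els.drop i) (fun e he => h e (List.mem_of_mem_drop he))
  have := List.sum_take_add_sum_drop els i
  omega

theorem sum_take_lt (els : List Int) (h : ∀ e ∈ els, 1 ≤ e) (i : Nat) (hi : i < els.length) :
    (els.take i).sum < els.sum := by
  have hne : els.drop i ≠ [] := by
    intro hnil
    have := List.length_drop (l := els) (i := i)
    rw [hnil] at this
    simp at this
    omega
  obtain ⟨x, t, hx⟩ := List.exists_cons_of_ne_nil hne
  have h1 : (1:Int) ≤ x := h x (by
    have : x ∈ els.drop i := by rw [hx]; simp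
    exact List.mem_of_mem_drop this)
  have ht : 0 ≤ t.sum := sum_nonneg_of_one_le t (fun e he => h e (by
    have : e ∈ els.drop i := by rw [hx]; simp [he]
    exact List.mem_of_mem_drop this))
  have hsplit := List.sum_take_add_sum_drop els i
  rw [hx] at hsplit
  simp at hsplit
  omega

theorem eraseIdx_append_right (P c : List Int) (k : Nat) :
    (P ++ c).eraseIdx (P.length + k) = P ++ c.eraseIdx k := by
  rw [List.eraseIdx_eq_take_drop_succ, List.eraseIdx_eq_take_drop_succ,
      List.take_length_add_append, show P.length + k + 1 = P.length + (k+1) by omega,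
      List.drop_length_add_append, List.append_assoc]

theorem getD_append_right (P c : List Int) (k : Nat) (d : Int) :
    (P ++ c).getD (P.length + k) d = c.getD k d := by
  rw [List.getD, List.getD, List.getElem?_append_right (by omega)]
  simp

theorem shiftOp_append (P c : List Int) (J K : Int) (hJ : 0 ≤ J) (hK : 0 ≤ K)
    (hJc : J < (c.length : Int)) (hKc : K ≤ (c.length : Int)) :
    shiftOp ((P.length : Int) + J) ((P.length : Int) + K) (P ++ c) = P ++ shiftOp J K c := by
  obtain ⟨j, rfl⟩ : ∃ j : Nat, J = (j : Int) := ⟨J.toNat, (Int.toNat_of_nonneg hJ).symm⟩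
  obtain ⟨kk, rfl⟩ : ∃ kk : Nat, K = (kk : Int) := ⟨K.toNat, (Int.toNat_of_nonneg hK).symm⟩
  have hj : j < c.length := by exact_mod_cast hJc
  have hkk : kk ≤ c.length := by exact_mod_cast hKc
  simp only [shiftOp]
  rw [← Nat.cast_add, PySem.List.pyGetD_natCast, PySem.List.pyGetD_natCast,
      getD_append_right,
      PySem.List.insert_natCast _ _ _ (by simp; omega),
      PySem.List.insert_natCast _ _ _ (by omega),
      List.take_length_add_append, List.drop_length_add_append]
  rw [List.append_assoc]
  set c1 := c.take j ++ (c.getD j 0 - 1) :: c.drop j with hc1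
  have hlc1 : c1.length = c.length + 1 := by
    simp [hc1]
  rw [← Nat.cast_add, PySem.List.pop?_natCast (P ++ c1) (P.length + kk) (by
        rw [List.length_append, hlc1]; omega),
      PySem.List.pop?_natCast c1 kk (by omega)]
  simp only []
  rw [eraseIdx_append_right P c1 kk]
theorem shiftOp_base (cur a b e : Int) (gsuf es : List Int) (he : 1 ≤ e) :
    shiftOp 0 e (bCoords cur (a :: b :: gsuf) (e :: es))
      = bCoords cur ((a - 1) :: (b + 1) :: gsuf) (e :: es) := by
  have hlt : cur + a < cur + a + e := by omega
  simp only [bCoords]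
  rw [PySem.List.pyRange_one_cons hlt]
  simp only [shiftOp, PySem.List.pyGetD_zero_cons, PySem.List.insert_zero, List.cons_append]
  simp only [← List.cons_append]
  rw [← PySem.List.pyRange_one_cons hlt]
  have hc2 := PySem.List.pyRange_one_cons (show cur + a - 1 < cur + a + e by omega)
  rw [show cur + a - 1 + 1 = cur + a by ring] at hc2
  rw [← hc2]
  -- split the widened block range at its last cell
  have hsplit : PySem.List.pyRange (cur + a - 1) (cur + a + e)
      = PySem.List.pyRange (cur + a - 1) (cur + a + e - 1) ++ [cur + a + e - 1] := by
    have := PySem.List.pyRange_one_succ_right (show cur + a - 1 ≤ cur + a + e - 1 by omega)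
    rw [show cur + a + e - 1 + 1 = cur + a + e by ring] at this
    exact this
  rw [hsplit]
  set R := PySem.List.pyRange (cur + a - 1) (cur + a + e - 1) with hR
  set rest := bCoords (cur + a + e + 1) (b :: gsuf) es with hrest
  have hlen : R.length = e.toNat := by rw [hR, PySem.List.length_pyRange_one]; omega
  have hpop : PySem.List.pop? ((R ++ [cur + a + e - 1]) ++ rest) e
      = some (cur + a + e - 1, R ++ rest) := by
    rw [List.append_assoc, List.cons_append, List.nil_append]
    rw [show (e : Int) = ((R.length : Nat) : Int) by rw [hlen]; omega]
    rw [PySem.List.pop?_natCast _ _ (by simp)]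
    congr 1
    rw [List.getElem_append_right (le_refl _)]
    simp only [Nat.sub_self, List.getElem_cons_zero]
    rw [show R.length = R.length + 0 by omega, eraseIdx_append_right]
    simp
  rw [hpop]
  show R ++ rest = _
  rw [show cur + (a - 1) = cur + a - 1 by ring]
  rw [show cur + a - 1 + e = cur + a + e - 1 by ring]
  rw [← hR]
  rw [show cur + a + e - 1 + 1 = cur + a + e by ring]
  have hsh := bCoords_shift_head (cur + a + e) b gsuf es
  rw [← hrest] at hsh
  rw [hsh]
theorem shiftOp_bCoords (i : Nat) (els : List Int) (h1 : ∀ e ∈ els, 1 ≤ e)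
    (hi : i < els.length) (cur a b : Int) (gpre gsuf : List Int) (hlen : gpre.length = i)
    (hg : els.length ≤ i + 2 + gsuf.length) :
    shiftOp ((els.take i).sum) ((els.take (i+1)).sum) (bCoords cur (gpre ++ a :: b :: gsuf) els)
      = bCoords cur (gpre ++ (a - 1) :: (b + 1) :: gsuf) els := by
  induction i generalizing els gpre cur with
  | zero =>
    rw [List.length_eq_zero_iff] at hlen
    subst hlen
    obtain ⟨e, es, rfl⟩ : ∃ e es, els = e :: es := by
      cases els with
      | nil => simp at hi
      | cons e es => exact ⟨e, es, rfl⟩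
    simp only [List.take_zero, List.sum_nil, List.take_succ_cons, List.take_zero,
      List.sum_cons, List.sum_nil, List.nil_append]
    rw [show e + 0 = e by ring]
    exact shiftOp_base cur a b e gsuf es (h1 e (by simp))
  | succ i ih =>
    obtain ⟨e, es, rfl⟩ : ∃ e es, els = e :: es := by
      cases els with
      | nil => simp at hi
      | cons e es => exact ⟨e, es, rfl⟩
    obtain ⟨g, gp, rfl⟩ : ∃ g gp, gpre = g :: gp := by
      cases gpre with
      | nil => simp at hlen
      | cons g gp => exact ⟨g, gp, rfl⟩
    have hgp : gp.length = i := by simpa using hlen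
    have hie : i < es.length := by simpa using hi
    have h1' : ∀ x ∈ es, 1 ≤ x := fun x hx => h1 x (by simp [hx])
    have he : (1:Int) ≤ e := h1 e (by simp)
    have hg' : es.length ≤ i + 2 + gsuf.length := by simp at hg; omega
    simp only [List.cons_append, bCoords, List.take_succ_cons, List.sum_cons]
    set P := PySem.List.pyRange (cur + g) (cur + g + e) with hP
    set c' := bCoords (cur + g + e + 1) (gp ++ a :: b :: gsuf) es with hc'
    have hPlen : (P.length : Int) = e := by
      rw [hP, PySem.List.length_pyRange_one]; omega
    have hclen : (c'.length : Int) = es.sum := by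
      rw [hc']
      exact bCoords_length _ _ _ h1' (by simp; omega)  -- uses hg'
    have hJ := sum_take_nonneg es h1' i
    have hK := sum_take_nonneg es h1' (i+1)
    have hJc : (es.take i).sum < (c'.length : Int) := by rw [hclen]; exact sum_take_lt es h1' i hie
    have hKc : (es.take (i+1)).sum ≤ (c'.length : Int) := by rw [hclen]; exact sum_take_le es h1' (i+1)
    rw [show e + (es.take i).sum = (P.length : Int) + (es.take i).sum by rw [hPlen],
        show e + (es.take (i+1)).sum = (P.length : Int) + (es.take (i+1)).sum by rw [hPlen]]
    rw [shiftOp_append P c' _ _ hJ hK hJc hKc]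
    rw [ih es h1' hie (cur + g + e + 1) gp hgp (by omega)]
theorem aShift_bCoords (i : Nat) (els : List Int) (h1 : ∀ e ∈ els, 1 ≤ e)
    (hi : i < els.length) (cur a b : Int) (gpre gsuf : List Int) (hlen : gpre.length = i)
    (hg : els.length ≤ i + 2 + gsuf.length) :
    aShift els i (bCoords cur (gpre ++ a :: b :: gsuf) els)
      = bCoords cur (gpre ++ (a - 1) :: (b + 1) :: gsuf) els := by
  rw [aShift_eq]
  exact shiftOp_bCoords i els h1 hi cur a b gpre gsuf hlen hg

-- moving the whole first gap into the running start position
theorem bCoords_absorb (cur a : Int) (gs els : List Int) :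
    bCoords cur (a :: gs) els = bCoords (cur + a) (0 :: gs) els := by
  cases els with
  | nil => simp [bCoords]
  | cons e es => simp only [bCoords]; ring_nf

-- A's first loop builds the fully right-packed placement
theorem aInit_coords (els : List Int) (acc : List Int) (cc : Int) :
    (els.foldl aInit (acc, cc)).1 = acc ++ bCoords 0 (cc :: List.replicate els.length 0) els := by
  induction els generalizing acc cc with
  | nil => simp [bCoords]
  | cons e es ih =>
    simp only [List.foldl_cons, aInit]
    rw [ih]
    simp only [List.length_cons, List.replicate_succ]
    rw [show bCoords 0 (cc :: 0 :: List.replicate es.length 0) (e :: es)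
          = PySem.List.pyRange cc (cc + e) 1 ++ bCoords (cc + e + 1) (0 :: List.replicate es.length 0) es by
        simp only [bCoords]; ring_nf]
    rw [bCoords_absorb (cc + e + 1) 0, show cc + e + 1 + 0 = cc + e + 1 by ring] at *
    rw [List.append_assoc]
    congr 1
    rw [bCoords_absorb 0 (cc + e + 1), show (0 : Int) + (cc + e + 1) = cc + e + 1 by ring]

-- the embedded placement of vector v with s extra blanks recorded in the next gap
def embedG (els : List Int) (pad : Nat) (s : Int) (v : List Int) : List Int :=
  bCoords 0 (v ++ s :: List.replicate pad 0) els

-- options appended during round s of a phase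
def partL (els : List Int) (I : Nat) (r : Int) (s : Nat) : List (List Int) :=
  (bVecs I (r - s)).map (embedG els (els.length - I - 1) (s : Int))

def optsAt (els : List Int) (I : Nat) (r : Int) (t : Nat) : List (List Int) :=
  (List.range (t+1)).flatMap (partL els I r)

def Mq : Nat → Int → Int
  | 0, _ => 0
  | I+1, b => Nlen I b

def nocAt (I : Nat) (r : Int) (t : Nat) : List Int :=
  ((List.range (r.toNat - t)).map (fun u : Nat => Mq I (r - 1 - t - (u : Int))))
    ++ ((List.range t).map (fun u : Nat => Nlen I (r - 1 - (u : Int))))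

def snAt (I : Nat) (r : Int) (t : Nat) : Int :=
  if I = 0 ∧ t = r.toNat then 1 else Nlen I (r - 1 - t)

theorem slice_optsAt (els : List Int) (I : Nat) (r : Int) (hr : 1 ≤ r) (t : Nat)
    (ht : t < r.toNat) :
    PySem.List.slice (optsAt els I r t) (some (-(snAt I r t))) none
      = ((bVecs I (r - 1 - t)).map incLast).map (embedG els (els.length - I - 1) (t : Int)) := by
  have htr : (t : Int) < r := by omega
  have hb0 : 0 ≤ r - 1 - t := by omega
  have hsn : snAt I r t = ((bVecs I (r - 1 - t)).length : Int) := by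
    rw [snAt, if_neg (by omega), Nlen, if_neg (by omega)]
  set k := (bVecs I (r - 1 - t)).length with hk
  have hkpos : 0 < k := List.length_pos_iff.mpr (bVecs_ne_nil I (r - 1 - t) hb0)
  rw [hsn, PySem.List.slice_from_neg_natCast _ _ hkpos]
  -- expose the final chunk and split it by the decomposition
  rw [optsAt, List.range_succ, List.flatMap_append, List.flatMap_singleton]
  rw [partL, bVecs_decomp I (r - t) (by omega), show r - t - 1 = r - 1 - t by ring,
      List.map_append, ← List.append_assoc]
  rw [show ((List.range t).flatMap (partL els I r)
          ++ (headPart I (r - t)).map (embedG els (els.length - I - 1) (t : Int))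
          ++ ((bVecs I (r - 1 - t)).map incLast).map (embedG els (els.length - I - 1) (t : Int))).length - k
        = ((List.range t).flatMap (partL els I r)
          ++ (headPart I (r - t)).map (embedG els (els.length - I - 1) (t : Int))).length by
      simp [hk]; omega]
  exact List.drop_left
theorem map_aShift_part (els : List Int) (h1 : ∀ e ∈ els, 1 ≤ e) (I : Nat)
    (hI : I < els.length) (b : Int) (s : Nat) :
    (((bVecs I b).map incLast).map (embedG els (els.length - I - 1) (s : Int))).map (aShift els I)
      = (bVecs I b).map (embedG els (els.length - I - 1) ((s : Nat) + 1 : Nat)) := by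
  rw [List.map_map, List.map_map]
  apply List.map_congr_left
  intro v hv
  have hvl : v.length = I + 1 := length_mem_bVecs I b v hv
  obtain ⟨w, x, rfl⟩ : ∃ w x, v = w ++ [x] := by
    rcases List.eq_nil_or_concat v with h | ⟨w, x, h⟩
    · rw [h] at hvl; simp at hvl
    · exact ⟨w, x, by simpa [List.concat_eq_append] using h⟩
  have hw : w.length = I := by simp at hvl; omega
  simp only [Function.comp_apply, incLast_append_singleton, embedG]
  rw [List.append_assoc, List.singleton_append, List.append_assoc, List.singleton_append]
  rw [aShift_bCoords I els h1 hI 0 (x + 1) (s : Int) w (List.replicate (els.length - I - 1) 0) hw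
      (by simp; omega)]
  rw [show x + 1 - 1 = x by ring, show ((s + 1 : Nat) : Int) = (s : Int) + 1 by push_cast; ring]
theorem sn_step (I : Nat) (r : Int) (hr : 1 ≤ r) (t : Nat) (ht : t < r.toNat) :
    snAt I r t - Mq I (r - 1 - t) = snAt I r (t + 1) := by
  have htr : (t : Int) < r := by omega
  cases I with
  | zero =>
    have e1 : snAt 0 r t = 1 := by
      rw [snAt, if_neg (fun hc => absurd hc.2 (by omega))]; exact Nlen_zero _ (by omega)
    have e2 : snAt 0 r (t + 1) = 1 := by
      by_cases h : t + 1 = r.toNat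
      · rw [snAt, if_pos ⟨rfl, h⟩]
      · rw [snAt, if_neg (fun hc => absurd hc.2 h)]
        exact Nlen_zero _ (by push_cast; omega)
    rw [e1, e2]
    simp [Mq]
  | succ I =>
    simp only [Mq, snAt, if_neg (by omega : ¬ (I + 1 = 0 ∧ t = r.toNat)),
      if_neg (by omega : ¬ (I + 1 = 0 ∧ t + 1 = r.toNat))]
    have hp := Nlen_pascal I (r - 1 - t) (by omega)
    push_cast
    rw [show r - 1 - (t + 1) = r - 1 - t - 1 by ring]
    omega

theorem noc_cons (I : Nat) (r : Int) (_hr : 1 ≤ r) (t : Nat) (ht : t < r.toNat) :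
    nocAt I r t ++ [snAt I r t] = Mq I (r - 1 - t) :: nocAt I r (t + 1) := by
  have hR : r.toNat - t = (r.toNat - t - 1) + 1 := by omega
  rw [nocAt, hR, List.range_succ_eq_map, List.map_cons, List.cons_append, List.cons_append]
  congr 1
  · norm_num
  · rw [nocAt, List.append_assoc]
    congr 1
    · rw [List.map_map]
      apply List.map_congr_left
      intro u _
      simp only [Function.comp_apply]
      congr 1
      push_cast
      ring
    · rw [show snAt I r t = Nlen I (r - 1 - t) by rw [snAt, if_neg (by omega)],
          List.range_succ, List.map_append, List.map_singleton]

theorem aRound_step (els : List Int) (h1 : ∀ e ∈ els, 1 ≤ e) (I : Nat) (hI : I < els.length)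
    (r : Int) (hr : 1 ≤ r) (t : Nat) (ht : t < r.toNat) :
    aRound els I (optsAt els I r t, nocAt I r t, snAt I r t)
      = (optsAt els I r (t + 1), nocAt I r (t + 1), snAt I r (t + 1)) := by
  simp only [aRound]
  rw [slice_optsAt els I r hr t ht,
      map_aShift_part els h1 I hI (r - 1 - t) t,
      noc_cons I r hr t ht, PySem.List.pop?_zero_cons]
  simp only [Prod.mk.injEq]
  refine ⟨?_, trivial, sn_step I r hr t ht⟩
  conv_rhs => rw [optsAt, List.range_succ, List.flatMap_append, List.flatMap_singleton]
  congr 1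
  rw [partL, show r - ((t + 1 : Nat) : Int) = r - 1 - (t : Int) by push_cast; ring]
theorem phase_fold (els : List Int) (h1 : ∀ e ∈ els, 1 ≤ e) (I : Nat) (hI : I < els.length)
    (r : Int) (hr : 1 ≤ r) :
    ∀ t, t ≤ r.toNat →
      (List.range t).foldl (fun s _ => aRound els I s) (optsAt els I r 0, nocAt I r 0, snAt I r 0)
        = (optsAt els I r t, nocAt I r t, snAt I r t)
  | 0, _ => by simp
  | t + 1, ht => by
    rw [List.range_succ, List.foldl_append, phase_fold els h1 I hI r hr t (by omega)]
    simp only [List.foldl_cons, List.foldl_nil]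
    exact aRound_step els h1 I hI r hr t (by omega)

theorem optsAt_full (els : List Int) (I : Nat) (r : Int) (hr : 1 ≤ r) :
    optsAt els I r r.toNat
      = (bVecs (I + 1) r).map (fun v => bCoords 0 (v ++ List.replicate (els.length - I - 1) 0) els) := by
  rw [optsAt, bVecs_succ_nonneg I r (by omega)]
  rw [show r + 1 = ((r.toNat + 1 : Nat) : Int) by push_cast; omega, PySem.List.pyRange_zero_natCast]
  rw [List.map_flatMap, List.flatMap_map]
  apply List.flatMap_congr
  intro s _
  rw [partL, List.map_map]
  apply List.map_congr_left
  intro v _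
  simp only [Function.comp_apply, embedG]
  rw [List.append_assoc, List.singleton_append]

theorem aPhase_state (els : List Int) (h1 : ∀ e ∈ els, 1 ≤ e) (I : Nat) (hI : I < els.length)
    (r : Int) (hr : 1 ≤ r) :
    aPhase els r (optsAt els I r 0, nocAt I r 0, snAt I r 0) I
      = (optsAt els I r r.toNat, nocAt I r r.toNat, (nocAt I r r.toNat).sum) := by
  simp only [aPhase]
  rw [phase_fold els h1 I hI r hr r.toNat (le_refl _)]
def stateAfter (els : List Int) (r : Int) (n : Nat) : List (List Int) × List Int × Int :=
  ((bVecs n r).map (fun v => bCoords 0 (v ++ List.replicate (els.length - n) 0) els),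
   (List.range r.toNat).map (fun u : Nat => Mq n (r - 1 - (u : Int))),
   if n = 0 then 1 else Nlen n (r - 1))

theorem stateAfter_glue (els : List Int) (r : Int) (hr : 1 ≤ r) (n : Nat)
    (hn : n < els.length) :
    stateAfter els r n = (optsAt els n r 0, nocAt n r 0, snAt n r 0) := by
  refine congrArg₂ _ ?_ (congrArg₂ _ ?_ ?_)
  · rw [optsAt, List.range_succ, List.range_zero, List.nil_append, List.flatMap_singleton, partL]
    rw [show r - ((0 : Nat) : Int) = r by norm_num]
    apply List.map_congr_left
    intro v _
    rw [embedG, show els.length - n = (els.length - n - 1) + 1 by omega, List.replicate_succ]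
    norm_num
  · rw [nocAt, List.range_zero, List.map_nil, List.append_nil, Nat.sub_zero]
    apply List.map_congr_left
    intro u _
    congr 1
    push_cast
    ring
  · have hsn : snAt n r 0 = Nlen n (r - 1) := by
      rw [snAt, if_neg (fun hc => by omega)]
      norm_num
    rw [hsn]
    cases n with
    | zero => rw [if_pos rfl, Nlen_zero _ (by omega)]
    | succ k => rw [if_neg (by omega)]

theorem outer_fold (els : List Int) (h1 : ∀ e ∈ els, 1 ≤ e) (r : Int) (hr : 1 ≤ r) :
    ∀ n, n ≤ els.length →
      (List.range n).foldl (aPhase els r) (stateAfter els r 0) = stateAfter els r n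
  | 0, _ => by simp
  | n + 1, hn => by
    rw [List.range_succ, List.foldl_append, outer_fold els h1 r hr n (by omega)]
    simp only [List.foldl_cons, List.foldl_nil]
    rw [stateAfter_glue els r hr n (by omega),
        aPhase_state els h1 n (by omega) r hr,
        optsAt_full els n r hr]
    refine congrArg₂ _ ?_ (congrArg₂ _ ?_ ?_)
    · rfl
    · rw [nocAt, Nat.sub_self, List.range_zero, List.map_nil, List.nil_append]
      rfl
    · rw [nocAt, Nat.sub_self, List.range_zero, List.map_nil, List.nil_append]
      have hh := Nlen_hockey n r.toNat
      rw [show ((r.toNat : Nat) : Int) = r by omega] at hh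
      simp only [if_neg (by omega : ¬ n + 1 = 0)]
      exact hh
theorem stateAfter_zero (els : List Int) (r : Int) (_hr : 0 ≤ r) :
    stateAfter els r 0
      = ([bCoords 0 (r :: List.replicate els.length 0) els],
         List.replicate r.toNat 0, 1) := by
  refine congrArg₂ _ ?_ (congrArg₂ _ ?_ rfl)
  · simp [bVecs]
  · simp only [Mq]
    rw [List.map_const', List.length_range]

-- when remainder ≤ 0 every phase leaves options and the queue unchanged
theorem fold_aPhase_trivial (els : List Int) (r : Int) (hr0 : r.toNat = 0) :
    ∀ (n : Nat) (st : List (List Int) × List Int × Int),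
      (((List.range n).foldl (aPhase els r) st).1 = st.1
        ∧ ((List.range n).foldl (aPhase els r) st).2.1 = st.2.1)
  | 0, st => ⟨rfl, rfl⟩
  | n + 1, st => by
    rw [List.range_succ, List.foldl_append]
    simp only [List.foldl_cons, List.foldl_nil]
    have ih := fold_aPhase_trivial els r hr0 n st
    simp only [aPhase, hr0, List.range_zero, List.foldl_nil]
    exact ⟨ih.1, ih.2⟩

theorem main_eq (row_len : Int) (elements : List Int)
    (h : row_len - (elements.sum + (elements.length : Int) - 1) ≤ 0 ∨ ∀ e ∈ elements, 1 ≤ e) :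
    get_all_row_options row_len elements = get_all_row_options_alt row_len elements := by
  rw [alt_eq]
  simp only [get_all_row_options]
  set r := row_len - (elements.sum + (elements.length : Int) - 1) with hrdef
  rw [aInit_coords elements [] r, List.nil_append, PySem.List.pyRepeat_singleton]
  rcases le_or_gt 1 r with hr | hr
  · -- main case: remainder ≥ 1 (so every block length is ≥ 1 by hypothesis)
    have h1 : ∀ e ∈ elements, 1 ≤ e := by
      rcases h with h | h
      · omega
      · exact h
    have h0 := stateAfter_zero elements r (by omega)
    rw [← h0, outer_fold elements h1 r hr elements.length (le_refl _)]
    simp only [stateAfter, Nat.sub_self, List.replicate_zero, List.append_nil]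
    rw [bVecs_eq_cons elements.length r (by omega), List.map_cons]
  · -- remainder ≤ 0: A's loops do nothing, B's shift enumeration is empty
    have hr0 : r.toNat = 0 := by omega
    have hf := fold_aPhase_trivial elements r hr0 elements.length
      ([bCoords 0 (r :: List.replicate elements.length 0) elements],
        List.replicate r.toNat 0, 1)
    rw [hf.1, bShifted_nonpos elements.length r (by omega)]
    simp

-- ===== VERDICT (by name: the statement is the Claim_ definition above) =====
theorem get_all_row_options_spec : Claim_equal_get_all_row_options := by
  intro row_len elements _ hpre
  show get_all_row_options row_len elements = get_all_row_options_alt row_len elements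
  exact main_eq row_len elements hpre
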